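-- pv_equiv track=rewrite | github.com/tusharkhanna575/6-Companies-30-Days | Amazon/9 Most Popular Video Creator.py | mostPopularCreator
-- ===== SOURCE A (Python) =====
-- from typing import List
--
-- def mostPopularCreator(cts: List[str], ids: List[str], views: List[int]) -> List[List[str]]:
--     d = {}
--     n = len(ids)
--     max_v = 0
--     for i in range(n):
--         if cts[i] not in d :
--             d[cts[i]] = [views[i] , ids[i] , views[i]]
--
--         else:
--             d[cts[i]][0] += views[i]
--             if views[i] > d[cts[i]][2] :
--                 d[cts[i]][2] = views[i]
--                 d[cts[i]][1] = ids[i]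
--             elif views[i] == d[cts[i]][2] :
--                 d[cts[i]][1] = min(d[cts[i]][1] , ids[i])
--
--         if d[cts[i]][0] > max_v:
--             max_v = d[cts[i]][0]
--
--     ans = []
--     for c in d:
--         if d[c][0] == max_v:
--             ans.append([c , d[c][1]])
--     return ans
-- ===== SOURCE B (Python) =====
-- from typing import List
--
-- def mostPopularCreator(cts: List[str], ids: List[str], views: List[int]) -> List[List[str]]:
--     totals = {}
--     groups = {}
--     max_v = 0
--     for i in range(len(ids)):
--         c, vid, v = cts[i], ids[i], views[i]
--         totals[c] = totals.get(c, 0) + v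
--         groups.setdefault(c, []).append((v, vid))
--         if totals[c] > max_v:
--             max_v = totals[c]
--     ans = []
--     for c, t in totals.items():
--         if t == max_v:
--             best = min(groups[c], key=lambda p: (-p[0], p[1]))
--             ans.append([c, best[1]])
--     return ans
-- ===== Notes on version B (the rewrite author's own statement) =====
-- stated objective: alternative
-- what changed: A maintains one dict of mutable [total, best_id, best_views] triples updated with branching logic inside the single loop; B's loop only accumulates per-creator totals and groups the (views, id) pairs, and a separate second pass picks each qualifying creator's best video with one min-with-key over its group.
import Mathlib
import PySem

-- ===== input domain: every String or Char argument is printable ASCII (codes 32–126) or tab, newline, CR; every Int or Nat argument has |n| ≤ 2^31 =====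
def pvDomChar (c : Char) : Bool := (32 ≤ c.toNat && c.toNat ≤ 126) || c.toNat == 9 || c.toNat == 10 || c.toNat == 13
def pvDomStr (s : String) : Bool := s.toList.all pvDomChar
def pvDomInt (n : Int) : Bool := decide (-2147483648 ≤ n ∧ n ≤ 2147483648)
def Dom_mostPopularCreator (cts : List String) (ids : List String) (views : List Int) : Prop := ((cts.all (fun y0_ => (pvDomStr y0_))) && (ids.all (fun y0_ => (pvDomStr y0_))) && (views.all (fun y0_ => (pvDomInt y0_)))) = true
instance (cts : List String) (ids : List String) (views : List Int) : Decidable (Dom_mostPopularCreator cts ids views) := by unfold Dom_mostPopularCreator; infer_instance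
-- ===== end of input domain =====

-- B re-implements A by a different decomposition: one pass that only accumulates per-creator
-- totals and groups the (views, id) pairs, then a second pass that picks each creator's best
-- video by a single min-with-key over its group; same return value on all inputs A accepts.

-- ===== PORT A =====
-- loop body of A's single 'for i in range(n)' loop (state: the dict d and max_v)
def pvStepA (s : PySem.Dict String (Int × String × Int) × Int) (t : String × String × Int) :
    PySem.Dict String (Int × String × Int) × Int :=
  let c := t.1
  let vid := t.2.1
  let v := t.2.2
  let d :=
    if !s.1.contains c then
      s.1.insert c (v, vid, v)
    else
      let e := s.1.getD c (0, "", 0)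
      let e1 := e.1 + v
      let e23 :=
        if v > e.2.2 then (vid, v)
        else if v == e.2.2 then (min e.2.1 vid, e.2.2)
        else e.2
      s.1.insert c (e1, e23)
  let mv := if (d.getD c (0, "", 0)).1 > s.2 then (d.getD c (0, "", 0)).1 else s.2
  (d, mv)

def mostPopularCreator (cts : List String) (ids : List String) (views : List Int) : List (List String) :=
  let n : Int := (ids.length : Int)
  let fin := (PySem.List.pyRange 0 n 1).foldl
    (fun s i => pvStepA s (PySem.List.pyGetD cts i "", PySem.List.pyGetD ids i "", PySem.List.pyGetD views i 0))
    (PySem.Dict.empty, 0)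
  fin.1.keys.foldl
    (fun ans c =>
      if (fin.1.getD c (0, "", 0)).1 == fin.2 then ans ++ [[c, (fin.1.getD c (0, "", 0)).2.1]]
      else ans) []

-- ===== PORT B =====
-- best[1] of min(group, key=lambda p: (-p[0], p[1])) — the group is never empty when looked up
def pvBestId (g : List (Int × String)) : String :=
  ((PySem.List.min2? g (fun p => -p.1) (fun p => p.2)).map (fun p => p.2)).getD ""

-- loop body of B's single grouping pass (state: totals, groups, max_v)
def pvStepB (s : PySem.Dict String Int × PySem.Dict String (List (Int × String)) × Int)
    (t : String × String × Int) :
    PySem.Dict String Int × PySem.Dict String (List (Int × String)) × Int :=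
  let c := t.1
  let totals := s.1.insert c (s.1.getD c 0 + t.2.2)
  let groups := s.2.1.modify c [] (fun g => g ++ [(t.2.2, t.2.1)])
  let mv := if totals.getD c 0 > s.2.2 then totals.getD c 0 else s.2.2
  (totals, groups, mv)

def mostPopularCreator_alt (cts : List String) (ids : List String) (views : List Int) : List (List String) :=
  let n : Int := (ids.length : Int)
  let fin := (PySem.List.pyRange 0 n 1).foldl
    (fun s i => pvStepB s (PySem.List.pyGetD cts i "", PySem.List.pyGetD ids i "", PySem.List.pyGetD views i 0))
    (PySem.Dict.empty, PySem.Dict.empty, 0)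
  fin.1.items.foldl
    (fun ans p =>
      if p.2 == fin.2.2 then ans ++ [[p.1, pvBestId (fin.2.1.getD p.1 [])]]
      else ans) []

-- ===== PRECONDITION & SPEC =====
-- Pre_ excludes exactly the inputs on which A raises IndexError: cts or views shorter than ids.
def Pre_mostPopularCreator (cts : List String) (ids : List String) (views : List Int) : Prop :=
  ids.length ≤ cts.length ∧ ids.length ≤ views.length
instance (cts : List String) (ids : List String) (views : List Int) : Decidable (Pre_mostPopularCreator cts ids views) := by unfold Pre_mostPopularCreator; infer_instance

def pvWitness_mostPopularCreator : List String × List String × List Int :=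
  (["a", "b", "a"], ["x", "y", "z"], [3, 5, 2])

def Spec_mostPopularCreator (cts : List String) (ids : List String) (views : List Int) (out : List (List String)) : Prop := out = mostPopularCreator_alt cts ids views
instance (cts : List String) (ids : List String) (views : List Int) (out : List (List String)) : Decidable (Spec_mostPopularCreator cts ids views out) := by unfold Spec_mostPopularCreator; infer_instance

-- ===== CLAIM (what is proved, stated in full; the proofs are below) =====
def Claim_equal_mostPopularCreator : Prop := ∀ (cts : List String) (ids : List String) (views : List Int), Dom_mostPopularCreator cts ids views → Pre_mostPopularCreator cts ids views → Spec_mostPopularCreator cts ids views (mostPopularCreator cts ids views)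

-- ===== LEMMAS AND PROOFS =====

-- the 'best (views, id) pair' of a group, as B's min-with-key computes it
def pvBest (g : List (Int × String)) : Int × String :=
  (PySem.List.min2? g (fun p => -p.1) (fun p => p.2)).getD (0, "")

-- one comparison step of Python's min(group, key=lambda p: (-p[0], p[1]))
def pvPick (m x : Int × String) : Int × String :=
  if (decide (-x.1 < -m.1) || !decide (-m.1 < -x.1) && decide (x.2 < m.2)) then x else m

lemma pvBestId_eq (g : List (Int × String)) : pvBestId g = (pvBest g).2 := by
  unfold pvBestId pvBest
  cases PySem.List.min2? g (fun p => -p.1) (fun p => p.2) <;> rfl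

lemma foldl_some_pick (f : Option (Int × String) → (Int × String) → Option (Int × String))
    (hf : ∀ m y, f (some m) y = some (pvPick m y)) :
    ∀ (t : List (Int × String)) (x : Int × String),
      t.foldl f (some x) = some (t.foldl pvPick x) := by
  intro t
  induction t with
  | nil => intro x; rfl
  | cons y t ih =>
    intro x
    simp only [List.foldl_cons, hf]
    exact ih (pvPick x y)

lemma pvBest_cons (x : Int × String) (t : List (Int × String)) :
    pvBest (x :: t) = t.foldl pvPick x := by
  unfold pvBest
  refine congrArg (fun o => o.getD (0, "")) (foldl_some_pick _ ?_ t x)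
  intro m y
  show (if (decide (-y.1 < -m.1) || !decide (-m.1 < -y.1) && decide (y.2 < m.2)) = true
        then some y else some m) = some (pvPick m y)
  unfold pvPick; split <;> rfl

lemma pvPick_eq (m : Int × String) (v : Int) (i : String) :
    pvPick m (v, i) =
      (if v > m.1 then (v, i)
       else if v == m.1 then (m.1, min m.2 i) else m) := by
  unfold pvPick
  rcases lt_trichotomy v m.1 with h | h | h
  · simp [show ¬ (-v < -m.1) from by omega, show (-m.1 < -v) from by omega,
      show ¬ m.1 < v from by omega, show ¬ v = m.1 from by omega]
  · subst h
    simp only [gt_iff_lt, lt_irrefl, if_false, beq_self_eq_true, if_true]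
    by_cases hi : i < m.2
    · simp [hi, min_eq_right hi.le]
    · simp [hi, min_eq_left (not_lt.mp hi)]
  · simp [show (-v < -m.1) from by omega, h]

lemma pvBest_append (g : List (Int × String)) (v : Int) (i : String) (hg : g ≠ []) :
    pvBest (g ++ [(v, i)]) =
      (if v > (pvBest g).1 then (v, i)
       else if v == (pvBest g).1 then ((pvBest g).1, min (pvBest g).2 i)
       else pvBest g) := by
  obtain ⟨x, t, rfl⟩ := List.exists_cons_of_ne_nil hg
  rw [List.cons_append, pvBest_cons, pvBest_cons, List.foldl_append, List.foldl_cons,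
    List.foldl_nil, pvPick_eq]

-- invariant tying A's one combined dict to B's (totals, groups) after the same prefix
def pvInv (a : PySem.Dict String (Int × String × Int) × Int)
    (b : PySem.Dict String Int × PySem.Dict String (List (Int × String)) × Int) : Prop :=
  a.2 = b.2.2 ∧ a.1.keys = b.1.keys ∧ b.1.keys = b.2.1.keys ∧ a.1.keys.Nodup ∧
  ∀ c, a.1.contains c = true →
    b.2.1.getD c [] ≠ [] ∧
    a.1.getD c (0, "", 0) =
      (b.1.getD c 0, (pvBest (b.2.1.getD c [])).2, (pvBest (b.2.1.getD c [])).1)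

lemma pvInv_step (a : PySem.Dict String (Int × String × Int) × Int)
    (b : PySem.Dict String Int × PySem.Dict String (List (Int × String)) × Int)
    (t : String × String × Int) (h : pvInv a b) : pvInv (pvStepA a t) (pvStepB b t) := by
  obtain ⟨ad, am⟩ := a
  obtain ⟨bt, bg, bm⟩ := b
  obtain ⟨c, i, v⟩ := t
  obtain ⟨h1, h2, h3, h4, h5⟩ := h
  simp only at h1 h2 h3 h4 h5
  by_cases hc : ad.contains c = true
  · -- creator already seen
    obtain ⟨hne, he⟩ := h5 c hc
    have hct : bt.contains c = true := by
      rw [PySem.Dict.contains_iff_mem_keys] at hc ⊢; rw [← h2]; exact hc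
    have hcg : bg.contains c = true := by
      rw [PySem.Dict.contains_iff_mem_keys] at hct ⊢; rw [← h3]; exact hct
    unfold pvStepA pvStepB
    simp only [hc, Bool.not_true, Bool.false_eq_true, if_false,
      PySem.Dict.getD_insert_self]
    refine ⟨?_, ?_, ?_, ?_, ?_⟩
    · -- max_v
      simp only [he, h1]
    · rw [PySem.Dict.keys_insert_of_contains _ _ hc, PySem.Dict.keys_insert_of_contains _ _ hct]
      exact h2
    · rw [PySem.Dict.keys_insert_of_contains _ _ hct, PySem.Dict.keys_modify,
        PySem.Dict.keys_insert_of_contains _ _ hcg]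
      exact h3
    · rw [PySem.Dict.keys_insert_of_contains _ _ hc]; exact h4
    · intro c' hc'
      by_cases hcc : c' = c
      · subst hcc
        simp only [PySem.Dict.getD_insert_self, PySem.Dict.getD_modify_self]
        refine ⟨?_, ?_⟩
        · exact fun hx => List.cons_ne_nil _ _ ((List.append_eq_nil_iff.mp hx).2)
        · rw [pvBest_append _ v i hne, he]
          by_cases hv1 : v > (pvBest (bg.getD c' [])).1
          · simp [hv1]
          · by_cases hv2 : v == (pvBest (bg.getD c' [])).1 <;> simp [hv1, hv2]
      · rw [PySem.Dict.contains_insert] at hc'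
        simp only [Bool.or_eq_true, beq_iff_eq] at hc'
        rw [PySem.Dict.getD_insert_of_ne _ _ _ hcc, PySem.Dict.getD_insert_of_ne _ _ _ hcc,
          PySem.Dict.getD_modify_of_ne _ _ _ hcc]
        exact h5 c' (hc'.resolve_left hcc)
  · -- first appearance of this creator
    have hc0 : ad.contains c = false := by simpa using hc
    have hct : bt.contains c = false := by
      rw [Bool.eq_false_iff]; intro hx
      rw [PySem.Dict.contains_iff_mem_keys, ← h2, ← PySem.Dict.contains_iff_mem_keys] at hx
      exact hc hx
    have hcg : bg.contains c = false := by
      rw [Bool.eq_false_iff]; intro hx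
      rw [PySem.Dict.contains_iff_mem_keys, ← h3, ← h2,
        ← PySem.Dict.contains_iff_mem_keys] at hx
      exact hc hx
    unfold pvStepA pvStepB
    simp only [hc0, Bool.not_false, if_true,
      PySem.Dict.getD_insert_self]
    have htg : bt.getD c 0 = 0 := PySem.Dict.getD_of_not_contains bt 0 hct
    refine ⟨?_, ?_, ?_, ?_, ?_⟩
    · simp only [htg, zero_add, h1]
    · rw [PySem.Dict.keys_insert_of_not_contains _ _ hc0,
        PySem.Dict.keys_insert_of_not_contains _ _ hct, h2]
    · rw [PySem.Dict.keys_insert_of_not_contains _ _ hct, PySem.Dict.keys_modify,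
        PySem.Dict.keys_insert_of_not_contains _ _ hcg, h3]
    · rw [PySem.Dict.keys_insert_of_not_contains _ _ hc0]
      apply List.Nodup.append h4 (List.nodup_singleton c)
      intro x hx hxc
      rw [List.mem_singleton] at hxc
      subst hxc
      exact hc ((PySem.Dict.contains_iff_mem_keys _ _).mpr hx)
    · intro c' hc'
      by_cases hcc : c' = c
      · subst hcc
        simp only [PySem.Dict.getD_insert_self, PySem.Dict.getD_modify_self,
          PySem.Dict.getD_of_not_contains bg [] hcg, List.nil_append, htg, zero_add]
        refine ⟨?_, ?_⟩
        · exact List.cons_ne_nil _ _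
        · rw [show pvBest [(v, i)] = (v, i) from by rw [pvBest_cons]; rfl]
      · rw [PySem.Dict.contains_insert] at hc'
        simp only [Bool.or_eq_true, beq_iff_eq] at hc'
        rw [PySem.Dict.getD_insert_of_ne _ _ _ hcc, PySem.Dict.getD_insert_of_ne _ _ _ hcc,
          PySem.Dict.getD_modify_of_ne _ _ _ hcc]
        exact h5 c' (hc'.resolve_left hcc)

lemma pvInv_foldl {ι : Type} (g : ι → String × String × Int) (L : List ι) :
    ∀ a b, pvInv a b →
      pvInv (L.foldl (fun s i => pvStepA s (g i)) a) (L.foldl (fun s i => pvStepB s (g i)) b) := by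
  induction L with
  | nil => intro a b h; exact h
  | cons x L ih => intro a b h; exact ih _ _ (pvInv_step a b (g x) h)

lemma pvOut_eq (a : PySem.Dict String (Int × String × Int) × Int)
    (b : PySem.Dict String Int × PySem.Dict String (List (Int × String)) × Int)
    (h : pvInv a b) :
    a.1.keys.foldl
      (fun ans c =>
        if (a.1.getD c (0, "", 0)).1 == a.2 then ans ++ [[c, (a.1.getD c (0, "", 0)).2.1]]
        else ans) []
    = b.1.items.foldl
      (fun ans p =>
        if p.2 == b.2.2 then ans ++ [[p.1, pvBestId (b.2.1.getD p.1 [])]]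
        else ans) [] := by
  obtain ⟨h1, h2, h3, h4, h5⟩ := h
  rw [PySem.Dict.items_eq_map_keys b.1 (h2 ▸ h4) 0, List.foldl_map, ← h2]
  apply PySem.List.foldl_congr_mem
  intro acc c hmem
  have hc : a.1.contains c = true := (PySem.Dict.contains_iff_mem_keys _ _).mpr hmem
  obtain ⟨-, he⟩ := h5 c hc
  rw [he, h1, pvBestId_eq]

-- ===== VERDICT (by name: the statement is the Claim_ definition above) =====
theorem mostPopularCreator_spec : Claim_equal_mostPopularCreator := by
  intro cts ids views _ _
  unfold Spec_mostPopularCreator mostPopularCreator mostPopularCreator_alt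
  exact pvOut_eq _ _ (pvInv_foldl _ _ _ _ (by
    refine ⟨rfl, rfl, rfl, List.nodup_nil, ?_⟩
    intro c hcon
    simp [PySem.Dict.contains_empty] at hcon))
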